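-- pv_equiv track=rewrite | github.com/shivg7706/CodeChef | APR18/GOODPREF.py | get_everything
-- ===== SOURCE A (Python) =====
-- def get_everything(string):
-- 	count_a, count_b, counter = 0, 0, 0
-- 	for i in string:
-- 		if i == 'a':
-- 			count_a += 1
-- 		else:
-- 			count_b += 1
-- 		if count_a > count_b:
-- 			counter += 1
--
-- 	return count_a, count_b, counter
-- ===== SOURCE B (Python) =====
-- def get_everything(string):
--     n = len(string)
--     pos = [j for j, c in enumerate(string) if c == 'a']
--     counter = 0
--     for k, (lo, nxt) in enumerate(zip(pos, pos[1:] + [n]), start=1):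
--         ub = min(nxt - 1, 2 * k - 2)
--         if ub >= lo:
--             counter += ub - lo + 1
--     return len(pos), n - len(pos), counter
-- ===== Notes on version B (the rewrite author's own statement) =====
-- stated objective: alternative
-- what changed: Instead of A's fused per-character pass comparing running a/b counts, B extracts the list of positions of 'a' and computes the good-prefix counter by interval arithmetic: for the k-th 'a' it adds the size of the clamped index interval [pos_k, min(next_pos-1, 2k-2)], since a prefix ending at index i with exactly k a's is good iff i <= 2k-2.
import Mathlib
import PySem

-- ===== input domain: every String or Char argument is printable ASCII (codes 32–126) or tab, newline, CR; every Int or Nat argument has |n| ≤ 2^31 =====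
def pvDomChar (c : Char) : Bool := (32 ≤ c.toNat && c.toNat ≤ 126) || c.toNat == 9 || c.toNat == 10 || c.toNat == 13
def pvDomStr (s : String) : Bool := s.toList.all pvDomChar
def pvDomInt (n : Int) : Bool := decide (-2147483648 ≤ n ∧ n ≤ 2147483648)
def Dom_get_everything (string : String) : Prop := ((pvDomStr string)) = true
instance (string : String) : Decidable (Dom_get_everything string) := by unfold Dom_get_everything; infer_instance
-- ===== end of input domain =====

-- B replaces A's fused per-character counting pass by interval arithmetic over the positions of 'a': for the k-th 'a' it adds the size of the index interval [pos_k, min(next_pos-1, 2k-2)] of good prefixes; same O(n) cost, genuinely different algorithm.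


-- ===== PORT A =====
-- A's loop body: if i == 'a': count_a += 1 else: count_b += 1; if count_a > count_b: counter += 1
def stepA (st : Int × Int × Int) (i : Char) : Int × Int × Int :=
  let st' : Int × Int × Int :=
    if i == 'a' then (st.1 + 1, st.2.1, st.2.2) else (st.1, st.2.1 + 1, st.2.2)
  if st'.1 > st'.2.1 then (st'.1, st'.2.1, st'.2.2 + 1) else st'

def get_everything (string : String) : Int × Int × Int :=
  string.toList.foldl stepA (0, 0, 0)

-- ===== PORT B =====
-- pos = [j for j, c in enumerate(string) if c == 'a']
def posOf (l : List Char) : List Int :=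
  ((PySem.List.enumerate l 0).filter (fun p => p.2 == 'a')).map (fun p => p.1)

-- B's loop body over enumerate(zip(pos, pos[1:] + [n]), start=1):
--   ub = min(nxt - 1, 2*k - 2); if ub >= lo: counter += ub - lo + 1
def stepB (st : Int × Int) (pr : Int × Int) : Int × Int :=
  let ub := min (pr.2 - 1) (2 * st.1 - 2)
  (st.1 + 1, if pr.1 ≤ ub then st.2 + (ub - pr.1 + 1) else st.2)

def get_everything_alt (string : String) : Int × Int × Int :=
  let l := string.toList
  let n : Int := l.length
  let pos := posOf l
  let counter := ((pos.zip (PySem.List.slice pos (some 1) none ++ [n])).foldl stepB (1, 0)).2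
  ((pos.length : Int), n - (pos.length : Int), counter)

-- ===== PRECONDITION & SPEC =====
def Spec_get_everything (string : String) (out : Int × Int × Int) : Prop := out = get_everything_alt string
instance (string : String) (out : Int × Int × Int) : Decidable (Spec_get_everything string out) := by unfold Spec_get_everything; infer_instance

-- ===== CLAIM (what is proved, stated in full; the proofs are below) =====
def Claim_equal_get_everything : Prop := ∀ (string : String), Dom_get_everything string → Spec_get_everything string (get_everything string)

-- ===== LEMMAS AND PROOFS =====

-- number of good prefixes of l (prefix i+1 is good iff its 'a'-count strictly exceeds its other-count)
def Gd (l : List Char) : Int :=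
  (((List.range l.length).countP
      (fun i => decide (2 * (((l.take (i+1)).count 'a' : Int)) > (i : Int) + 1))) : Int)

theorem Gd_nil : Gd [] = 0 := by simp [Gd]

theorem Gd_append (l : List Char) (c : Char) :
    Gd (l ++ [c]) = Gd l +
      (if 2 * (((l ++ [c]).count 'a' : Int)) > (l.length : Int) + 1 then 1 else 0) := by
  unfold Gd
  rw [List.length_append, List.length_singleton, List.range_succ, List.countP_append]
  have h1 : (List.range l.length).countP
      (fun i => decide (2 * ((((l ++ [c]).take (i+1)).count 'a' : Int)) > (i : Int) + 1))
      = (List.range l.length).countP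
      (fun i => decide (2 * (((l.take (i+1)).count 'a' : Int)) > (i : Int) + 1)) := by
    apply List.countP_congr
    intro i hi
    have hlt : i < l.length := List.mem_range.mp hi
    rw [List.take_append_of_le_length (by omega)]
  have h2 : (l ++ [c]).take (l.length + 1) = l ++ [c] := by
    apply List.take_of_length_le
    simp
  rw [h1, List.countP_singleton, h2]
  by_cases h : 2 * (((l ++ [c]).count 'a' : Int)) > (l.length : Int) + 1 <;> simp [h]

-- A's fold computes ('a'-count, other-count, number of good prefixes)
theorem A_fold (l : List Char) :
    l.foldl stepA (0, 0, 0)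
      = ((l.count 'a' : Int), (l.length : Int) - (l.count 'a' : Int), Gd l) := by
  induction l using List.reverseRecOn with
  | nil => simp [Gd_nil]
  | append_singleton l c ih =>
    rw [List.foldl_append, ih, List.foldl_cons, List.foldl_nil, Gd_append]
    by_cases hc : c = 'a'
    · subst hc
      have hcnt : ((l ++ ['a']).count 'a' : Int) = (l.count 'a' : Int) + 1 := by
        simp [List.count_append]
      rw [hcnt]
      by_cases hgt : ((l.count 'a' : Int) + 1) > ((l.length : Int) - (l.count 'a' : Int)) <;>
        · simp only [stepA, beq_self_eq_true, if_true]
          have : (2 * ((l.count 'a' : Int) + 1) > (l.length : Int) + 1) =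
              (((l.count 'a' : Int) + 1) > ((l.length : Int) - (l.count 'a' : Int))) := by
            simp only [eq_iff_iff]; omega
          simp [hgt, this] <;> omega
    · have hcnt : ((l ++ [c]).count 'a' : Int) = (l.count 'a' : Int) := by
        simp [List.count_append, hc]
      rw [hcnt]
      by_cases hgt : ((l.count 'a' : Int)) > ((l.length : Int) - (l.count 'a' : Int)) + 1 <;>
        · have hb : (c == 'a') = false := by simp [hc]
          simp only [stepA, hb, Bool.false_eq_true, if_false]
          have : (2 * ((l.count 'a' : Int)) > (l.length : Int) + 1) =
              (((l.count 'a' : Int)) > ((l.length : Int) - (l.count 'a' : Int)) + 1) := by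
            simp only [eq_iff_iff]; omega
          simp [hgt, this] <;> omega

-- posOf facts
theorem posOf_nil : posOf [] = [] := by simp [posOf, PySem.List.enumerate_nil]

theorem posOf_append (l : List Char) (c : Char) :
    posOf (l ++ [c]) = posOf l ++ (if c = 'a' then [(l.length : Int)] else []) := by
  unfold posOf
  rw [PySem.List.enumerate_append, List.filter_append, List.map_append]
  congr 1
  by_cases hc : c = 'a' <;>
    simp [PySem.List.enumerate_cons, PySem.List.enumerate_nil, hc]

theorem posOf_length (l : List Char) : (posOf l).length = l.count 'a' := by
  unfold posOf
  rw [List.length_map]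
  induction l using List.reverseRecOn with
  | nil => simp [PySem.List.enumerate_nil]
  | append_singleton l c ih =>
    rw [PySem.List.enumerate_append, List.filter_append, List.length_append, ih,
      List.count_append]
    by_cases hc : c = 'a' <;>
      simp [PySem.List.enumerate_cons, PySem.List.enumerate_nil, hc]

theorem posOf_lt (l : List Char) : ∀ p ∈ posOf l, p < (l.length : Int) := by
  intro p hp
  unfold posOf at hp
  rcases List.mem_map.mp hp with ⟨q, hq, hpq⟩
  have hq' := List.mem_filter.mp hq
  rcases (PySem.List.mem_enumerate_iff _ _ _).mp hq'.1 with ⟨k, hk, rfl⟩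
  subst hpq
  simp
  omega

-- appending one position: the zipped pair list gains exactly one pair, the old sentinel becoming real
theorem zip_sentinel (qs : List Int) (q x : Int) :
    (qs ++ [q]).zip (((qs ++ [q]).drop 1) ++ [x]) = qs.zip (qs.drop 1 ++ [q]) ++ [(q, x)] := by
  induction qs with
  | nil => simp
  | cons a as ih =>
    cases as with
    | nil => simp
    | cons b bs =>
      simp only [List.cons_append, List.drop_one, List.tail_cons, List.zip_cons_cons] at *
      rw [ih]

-- the k component of B's fold just counts pairs
theorem foldB_fst (ps : List (Int × Int)) : ∀ (k c : Int),
    (ps.foldl stepB (k, c)).1 = k + (ps.length : Int) := by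
  induction ps with
  | nil => intro k c; simp
  | cons p t ih =>
    intro k c
    rw [List.foldl_cons]
    show (t.foldl stepB (k + 1, _)).1 = _
    rw [ih]
    simp only [List.length_cons]
    push_cast
    ring

-- B's counter over the position list of l equals the number of good prefixes of l
theorem B_counter (l : List Char) :
    (((posOf l).zip ((posOf l).drop 1 ++ [(l.length : Int)])).foldl stepB (1, 0)).2 = Gd l := by
  induction l using List.reverseRecOn with
  | nil => simp [posOf_nil, Gd_nil]
  | append_singleton l c ih =>
    have hm : ((posOf l).length : Int) = (l.count 'a' : Int) := by
      exact_mod_cast congrArg Nat.cast (posOf_length l)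
    rw [posOf_append, Gd_append, List.length_append, List.length_singleton]
    push_cast
    by_cases hc : c = 'a'
    · subst hc
      simp only [if_true]
      have hcnt : (((l ++ ['a']).count 'a' : Int)) = (l.count 'a' : Int) + 1 := by
        simp [List.count_append]
      rw [hcnt]
      rcases List.eq_nil_or_concat (posOf l) with hnil | ⟨qs, q, hqq⟩
      · -- no previous 'a': count = 0
        have h0 : (l.count 'a' : Int) = 0 := by rw [← hm, hnil]; simp
        have hGd : Gd l = 0 := by
          have h := ih; rw [hnil] at h; simpa using h.symm
        rw [hnil, hGd, h0]
        simp only [List.nil_append, List.drop_one, List.tail_cons, List.zip_cons_cons,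
          List.zip_nil_right, List.foldl_cons, List.foldl_nil, stepB]
        split_ifs <;> simp_all <;> try omega
      · rw [List.concat_eq_append] at hqq
        rw [hqq]
        rw [zip_sentinel (qs ++ [q]) (l.length : Int) ((l.length : Int) + 1),
            List.foldl_append]
        rw [hqq] at ih
        -- the fold state before the appended pair
        set Z := (qs ++ [q]).zip (((qs ++ [q]).drop 1) ++ [(l.length : Int)]) with hZ
        have hlenZ : (Z.length : Int) = (l.count 'a' : Int) := by
          rw [hZ, List.length_zip]
          have h : ((qs ++ [q]).drop 1 ++ [(l.length : Int)]).length = (qs ++ [q]).length := by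
            simp
          rw [h, min_self, ← hm, hqq]
        have hst : Z.foldl stepB (1, 0) = ((l.count 'a' : Int) + 1, Gd l) := by
          have h1 := foldB_fst Z 1 0
          have h2 : (Z.foldl stepB (1, 0)).2 = Gd l := ih
          have h3 : Z.foldl stepB (1, 0) = ((Z.foldl stepB (1, 0)).1, (Z.foldl stepB (1, 0)).2) := rfl
          rw [h3, h1, h2, hlenZ, add_comm]
        rw [hst]
        simp only [List.foldl_cons, List.foldl_nil, stepB]
        split_ifs <;> simp_all <;> try omega
    · -- c is not 'a': positions unchanged, sentinel grows by 1
      simp only [hc, if_false, List.append_nil]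
      have hcnt : (((l ++ [c]).count 'a' : Int)) = (l.count 'a' : Int) := by
        simp [List.count_append, hc]
      rw [hcnt]
      rcases List.eq_nil_or_concat (posOf l) with hnil | ⟨qs, q, hqq⟩
      · have h0 : (l.count 'a' : Int) = 0 := by rw [← hm, hnil]; simp
        rw [hnil] at ih ⊢
        simp at ih ⊢
        rw [← ih]; omega
      · rw [List.concat_eq_append] at hqq
        have hqlt : q < (l.length : Int) := by
          apply posOf_lt l
          rw [hqq]; simp
        rw [hqq] at ih ⊢
        rw [zip_sentinel qs q ((l.length : Int) + 1), List.foldl_append]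
        rw [zip_sentinel qs q (l.length : Int), List.foldl_append] at ih
        set S := (qs.zip (qs.drop 1 ++ [q])).foldl stepB (1, 0) with hS
        have hS1 : S.1 = 1 + (qs.length : Int) := by
          rw [hS, foldB_fst]
          simp [List.length_zip]
          omega
        simp only [List.foldl_cons, List.foldl_nil, stepB] at ih ⊢
        rw [hS1] at ih ⊢
        rw [← ih]
        split_ifs <;> simp_all <;> try omega

-- ===== VERDICT (by name: the statement is the Claim_ definition above) =====
theorem get_everything_spec : Claim_equal_get_everything := by
  intro s _
  simp only [Spec_get_everything, get_everything, get_everything_alt,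
    PySem.List.slice_from_one, ← List.drop_one]
  rw [A_fold, B_counter, posOf_length]
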